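-- pv_equiv track=rewrite | github.com/khc8655/wiki | scripts/query_excel_knowledge.py | format_comparison_result
-- ===== SOURCE A (Python) =====
-- def format_comparison_result(results, query):
--     """Format comparison results"""
--     if not results:
--         return "未找到相关结果"
--
--     # Group by model
--     models = {}
--     for result in results:
--         model = result['record']['model']
--         if model not in models:
--             models[model] = []
--         models[model].append(result['record'])
--
--     lines = [f"\n找到 {len(models)} 个相关型号:"]
--
--     for model, records in sorted(models.items()):
--         lines.append(f"\n【{model}】")
--         for r in records[:8]:  # Show top 8 features
--             lines.append(f"  - {r['feature']}: {r['value'][:100]}")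
--
--     return '\n'.join(lines)
-- ===== SOURCE B (Python) =====
-- def _groups(recs):
--     """Recursively emit one block per run of equal models in an already-sorted list."""
--     if not recs:
--         return (0, "")
--     m = recs[0]['model']
--     i = 1
--     while i < len(recs) and recs[i]['model'] == m:
--         i += 1
--     grp, tail = recs[:i], recs[i:]
--     body = "".join("\n  - %s: %s" % (r['feature'], r['value'][:100]) for r in grp[:8])
--     c, s = _groups(tail)
--     return (c + 1, "\n\n\u3010%s\u3011%s%s" % (m, body, s))
--
--
-- def format_comparison_result(results, query):
--     """Format comparison results"""
--     if not results:
--         return "\u672a\u627e\u5230\u76f8\u5173\u7ed3\u679c"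
--     recs = sorted((r['record'] for r in results), key=lambda rec: rec['model'])
--     count, out = _groups(recs)
--     return "\n\u627e\u5230 %d \u4e2a\u76f8\u5173\u578b\u53f7:" % count + out
-- ===== Notes on version B (the rewrite author's own statement) =====
-- stated objective: alternative
-- what changed: B replaces A's dict-of-lists grouping plus items-sort-and-join with a stable sort of the records by model followed by a recursive groupby-style scan over runs of equal models that concatenates each block directly into one string.
import Mathlib
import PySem

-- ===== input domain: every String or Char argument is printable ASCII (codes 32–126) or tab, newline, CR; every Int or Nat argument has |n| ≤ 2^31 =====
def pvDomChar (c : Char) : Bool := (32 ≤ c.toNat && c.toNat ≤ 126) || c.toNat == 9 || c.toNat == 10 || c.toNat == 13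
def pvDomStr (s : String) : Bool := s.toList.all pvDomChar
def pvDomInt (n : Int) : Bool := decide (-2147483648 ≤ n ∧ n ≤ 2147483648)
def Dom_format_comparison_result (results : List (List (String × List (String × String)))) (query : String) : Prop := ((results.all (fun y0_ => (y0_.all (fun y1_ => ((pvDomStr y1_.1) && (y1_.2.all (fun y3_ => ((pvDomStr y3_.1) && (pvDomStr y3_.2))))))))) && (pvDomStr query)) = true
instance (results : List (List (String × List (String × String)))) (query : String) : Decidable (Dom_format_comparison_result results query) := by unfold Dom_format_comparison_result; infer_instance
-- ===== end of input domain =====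

-- B replaces A's dict-of-lists grouping + items-sort + list-of-lines join with a stable
-- sort of the records by model followed by a recursive groupby-style scan over runs of
-- equal models that concatenates each block directly (alternative algorithm, same result).
-- Shared small helpers (dict lookups both programs perform on each record):
def pvRecOf (result : List (String × List (String × String))) : List (String × String) :=
  ((PySem.Dict.mk result).get? "record").getD []

def pvModelOf (rec : List (String × String)) : String :=
  ((PySem.Dict.mk rec).get? "model").getD ""

-- "  - {r['feature']}: {r['value'][:100]}"
def pvLine (r : List (String × String)) : String :=
  "  - " ++ ((PySem.Dict.mk r).get? "feature").getD "" ++ ": " ++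
    PySem.Str.slice (((PySem.Dict.mk r).get? "value").getD "") none (some 100)

-- ===== PORT A =====
-- sorted(models.items()) compares (key, value) tuples; the dict's keys are unique, so
-- Python never reaches the value comparison and the sort is exactly a sort on the key.
def format_comparison_result (results : List (List (String × List (String × String)))) (query : String) : String :=
  if results = [] then "未找到相关结果"
  else
    -- 'if model not in models: models[model] = []; models[model].append(record)'
    let models := results.foldl
      (fun (d : PySem.Dict String (List (List (String × String)))) result =>
        d.modify (pvModelOf (pvRecOf result)) [] (· ++ [pvRecOf result]))
      PySem.Dict.empty
    let lines : List String := ["\n找到 " ++ PySem.Int.toStr (models.size : Int) ++ " 个相关型号:"]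
    let lines := (PySem.List.sorted models.items (fun p => p.1) false).foldl
      (fun lines p =>
        (PySem.List.slice p.2 none (some 8)).foldl
          (fun lines r => lines ++ [pvLine r])
          (lines ++ ["\n【" ++ p.1 ++ "】"]))
      lines
    PySem.Str.join "\n" lines

-- ===== PORT B =====
-- '_groups': one block per run of equal models in the (already key-sorted) record list.
def pvGroupsB : List (List (String × String)) → Nat × String
  | [] => (0, "")
  | r :: rest =>
    let m := pvModelOf r
    let grp := r :: rest.takeWhile (fun x => pvModelOf x == m)
    let body := String.join ((PySem.List.slice grp none (some 8)).map (fun x => "\n" ++ pvLine x))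
    let res := pvGroupsB (rest.dropWhile (fun x => pvModelOf x == m))
    (res.1 + 1, "\n\n【" ++ m ++ "】" ++ body ++ res.2)
termination_by l => l.length
decreasing_by
  simp only [List.length_cons]
  exact Nat.lt_succ_of_le (List.length_dropWhile_le _ _)

def format_comparison_result_alt (results : List (List (String × List (String × String)))) (query : String) : String :=
  if results = [] then "未找到相关结果"
  else
    let recs := PySem.List.sorted (results.map pvRecOf) pvModelOf false
    let res := pvGroupsB recs
    "\n找到 " ++ PySem.Int.toStr (res.1 : Int) ++ " 个相关型号:" ++ res.2

-- ===== PRECONDITION & SPEC =====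
-- Pre_ excludes exactly the inputs on which the Python A raises KeyError: a result
-- without a 'record' key, a record without 'model', or a record that is among the
-- first 8 of its model's group (the only ones formatted) without 'feature'/'value'.
def Pre_format_comparison_result (results : List (List (String × List (String × String)))) (query : String) : Prop :=
  ∀ i : Nat, i < results.length →
    (PySem.Dict.mk results[i]!).contains "record" = true ∧
    (PySem.Dict.mk (pvRecOf results[i]!)).contains "model" = true ∧
    (((results.take i).countP (fun r => pvModelOf (pvRecOf r) == pvModelOf (pvRecOf results[i]!))) < 8 →
      (PySem.Dict.mk (pvRecOf results[i]!)).contains "feature" = true ∧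
      (PySem.Dict.mk (pvRecOf results[i]!)).contains "value" = true)

instance (results : List (List (String × List (String × String)))) (query : String) : Decidable (Pre_format_comparison_result results query) := by
  unfold Pre_format_comparison_result; infer_instance

def pvWitness_format_comparison_result : (List (List (String × List (String × String)))) × String :=
  ([[("record", [("model", "A1"), ("feature", "cpu"), ("value", "fast")])],
    [("record", [("model", "A1"), ("feature", "ram"), ("value", "8G")])]], "A1")

def Spec_format_comparison_result (results : List (List (String × List (String × String)))) (query : String) (out : String) : Prop := out = format_comparison_result_alt results query
instance (results : List (List (String × List (String × String)))) (query : String) (out : String) : Decidable (Spec_format_comparison_result results query out) := by unfold Spec_format_comparison_result; infer_instance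

-- ===== CLAIM (what is proved, stated in full; the proofs are below) =====
def Claim_equal_format_comparison_result : Prop := ∀ (results : List (List (String × List (String × String)))) (query : String), Dom_format_comparison_result results query → Pre_format_comparison_result results query → Spec_format_comparison_result results query (format_comparison_result results query)

-- ===== LEMMAS AND PROOFS =====

-- abbreviations for the proofs: per-model group and the sorted distinct models
def pvGrp (xs : List (List (String × String))) (m : String) : List (List (String × String)) :=
  xs.filter (fun r => pvModelOf r == m)
def pvMs (xs : List (List (String × String))) : List String :=
  PySem.List.sorted (PySem.List.dedup (xs.map pvModelOf)) (fun x => x) false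
def pvBody (g : List (List (String × String))) : String :=
  String.join ((PySem.List.slice g none (some 8)).map (fun x => "\n" ++ pvLine x))

-- ---- string-join algebra ----
theorem join_foldl (l : List String) : ∀ a : String, l.foldl (· ++ ·) a = a ++ String.join l := by
  induction l with
  | nil => intro a; simp [String.join]
  | cons s t ih =>
    intro a
    show t.foldl (· ++ ·) (a ++ s) = a ++ String.join (s :: t)
    rw [ih (a ++ s), String.append_assoc]
    congr 1
    show s ++ String.join t = String.join (s :: t)
    show s ++ String.join t = t.foldl (· ++ ·) ("" ++ s)
    rw [ih ("" ++ s)]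
    simp

theorem join_cons (s : String) (l : List String) : String.join (s :: l) = s ++ String.join l := by
  show l.foldl (· ++ ·) ("" ++ s) = _
  rw [join_foldl]; simp

theorem join_append (a b : List String) : String.join (a ++ b) = String.join a ++ String.join b := by
  induction a with
  | nil => simp [String.join]
  | cons s t ih => simp only [List.cons_append, join_cons, ih, String.append_assoc]

theorem join_flatMap {α : Type} (l : List α) (G : α → List String) :
    String.join (l.flatMap G) = String.join (l.map (fun x => String.join (G x))) := by
  induction l with
  | nil => rfl
  | cons x t ih => simp only [List.flatMap_cons, join_append, ih, List.map_cons, join_cons]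

theorem str_join_cons₂ (sep p q : String) (rest : List String) :
    PySem.Str.join sep (p :: q :: rest) = p ++ sep ++ PySem.Str.join sep (q :: rest) := by
  show String.ofList (PySem.Chars.join sep.toList (List.map String.toList (p :: q :: rest))) = _
  rw [List.map_cons, List.map_cons, PySem.Chars.join_cons_cons]
  show _ = p ++ sep ++ String.ofList (PySem.Chars.join sep.toList (List.map String.toList (q :: rest)))
  rw [List.map_cons]
  simp [String.append_assoc]

theorem str_join_newline (h : String) (L : List String) :
    PySem.Str.join "\n" (h :: L) = h ++ String.join (L.map (fun s => "\n" ++ s)) := by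
  induction L generalizing h with
  | nil =>
    show String.ofList (PySem.Chars.join "\n".toList (List.map String.toList [h])) = _
    rw [List.map_cons, List.map_nil, PySem.Chars.join_singleton]
    simp [String.join]
  | cons s t ih =>
    rw [str_join_cons₂, ih s, List.map_cons, join_cons, String.append_assoc, String.append_assoc]

-- ---- insertion-sort stability: sorted xs key = concatenation of the key-groups ----
theorem insertBy_skip {α : Type} (before : α → α → Bool) (x : α) (l₁ l₂ : List α)
    (h : ∀ y ∈ l₁, before x y = false) :
    PySem.List.insertBy before x (l₁ ++ l₂) = l₁ ++ PySem.List.insertBy before x l₂ := by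
  induction l₁ with
  | nil => simp
  | cons y t ih =>
    have hy : before x y = false := h y (by simp)
    rw [List.cons_append]
    have step : PySem.List.insertBy before x (y :: (t ++ l₂))
        = y :: PySem.List.insertBy before x (t ++ l₂) := by
      simp [PySem.List.insertBy, hy]
    rw [step, ih (fun y hy => h y (by simp [hy])), List.cons_append]

theorem insertBy_front {α : Type} (before : α → α → Bool) (x : α) (l : List α)
    (h : ∀ y ∈ l, before x y = true) :
    PySem.List.insertBy before x l = x :: l := by
  cases l with
  | nil => simp [PySem.List.insertBy]
  | cons y t => simp [PySem.List.insertBy, h y (by simp)]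

theorem flatMap_congr_mem {α β : Type} (l : List α) (f g : α → List β)
    (h : ∀ a ∈ l, f a = g a) : l.flatMap f = l.flatMap g := by
  simp only [List.flatMap_def]
  rw [List.map_congr_left h]

theorem insertBy_grouped_mem {α : Type} (key : α → String) (x : α) :
    ∀ (ms : List String) (g : String → List α), ms.Pairwise (· < ·) → key x ∈ ms →
    (∀ m ∈ ms, ∀ y ∈ g m, key y = m) →
    PySem.List.insertBy (fun a b => decide (key a < key b)) x (ms.flatMap g)
      = ms.flatMap (fun m => if m = key x then g m ++ [x] else g m) := by
  intro ms
  induction ms with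
  | nil => intro g _ hk; exact absurd hk (by simp)
  | cons m t ih =>
    intro g hp hk hg
    have hpt := (List.pairwise_cons.mp hp).2
    have hmt : ∀ m' ∈ t, m < m' := (List.pairwise_cons.mp hp).1
    rw [List.flatMap_cons, List.flatMap_cons]
    by_cases hm : m = key x
    · have h₁ : ∀ y ∈ g m, (decide (key x < key y) : Bool) = false := by
        intro y hy
        have hk := hg m (by simp) y hy
        simp [hk, ← hm]
      rw [insertBy_skip _ _ _ _ h₁]
      have h₂ : ∀ y ∈ t.flatMap g, (decide (key x < key y) : Bool) = true := by
        intro y hy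
        obtain ⟨m', hm', hy'⟩ := List.mem_flatMap.mp hy
        have hk := hg m' (by simp [hm']) y hy'
        simp [hk, ← hm]
        exact String.lt_iff_toList_lt.mp (hmt m' hm')
      rw [insertBy_front _ _ _ h₂]
      have h₃ : t.flatMap (fun m => if m = key x then g m ++ [x] else g m) = t.flatMap g := by
        apply flatMap_congr_mem
        intro a ha
        have : key x < a := hm ▸ hmt a ha
        simp [ne_of_gt this]
      rw [h₃, if_pos hm]
      simp
    · have hk' : key x ∈ t := by
        rcases List.mem_cons.mp hk with h | h
        · exact absurd h.symm hm
        · exact h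
      have hmlt : m < key x := hmt _ hk'
      have h₁ : ∀ y ∈ g m, (decide (key x < key y) : Bool) = false := by
        intro y hy
        have hk := hg m (by simp) y hy
        simp [hk]
        exact le_of_lt (String.lt_iff_toList_lt.mp hmlt)
      rw [insertBy_skip _ _ _ _ h₁, ih g hpt hk' (fun m' hm' => hg m' (by simp [hm'])),
        if_neg hm]

theorem insertBy_grouped_not_mem {α : Type} (key : α → String) (x : α) :
    ∀ (ms : List String) (g : String → List α), ms.Pairwise (· < ·) → key x ∉ ms →
    (∀ m ∈ ms, ∀ y ∈ g m, key y = m) →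
    PySem.List.insertBy (fun a b => decide (key a < key b)) x (ms.flatMap g)
      = (ms.takeWhile (fun a => decide (a < key x))).flatMap g ++ [x]
          ++ (ms.dropWhile (fun a => decide (a < key x))).flatMap g := by
  intro ms
  induction ms with
  | nil => intro g _ _ _; simp [PySem.List.insertBy]
  | cons m t ih =>
    intro g hp hk hg
    have hpt := (List.pairwise_cons.mp hp).2
    have hmt : ∀ m' ∈ t, m < m' := (List.pairwise_cons.mp hp).1
    have hmx : m ≠ key x := fun h => hk (by simp [h])
    rw [List.flatMap_cons]
    rcases lt_or_gt_of_ne hmx with hlt | hgt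
    · have h₁ : ∀ y ∈ g m, (decide (key x < key y) : Bool) = false := by
        intro y hy
        have hk := hg m (by simp) y hy
        simp [hk]
        exact le_of_lt (String.lt_iff_toList_lt.mp hlt)
      rw [insertBy_skip _ _ _ _ h₁,
        ih g hpt (fun h => hk (by simp [h])) (fun m' hm' => hg m' (by simp [hm']))]
      rw [List.takeWhile_cons, List.dropWhile_cons]
      simp only [decide_eq_true_eq, if_pos hlt, List.flatMap_cons]
      simp [List.append_assoc]
    · have h₂ : ∀ y ∈ (m :: t).flatMap g, (decide (key x < key y) : Bool) = true := by
        intro y hy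
        obtain ⟨m', hm', hy'⟩ := List.mem_flatMap.mp hy
        have hk := hg m' hm' y hy'
        simp [hk]
        rcases List.mem_cons.mp hm' with h | h
        · exact h ▸ String.lt_iff_toList_lt.mp hgt
        · exact lt_trans (String.lt_iff_toList_lt.mp hgt) (String.lt_iff_toList_lt.mp (hmt _ h))
      rw [List.flatMap_cons] at h₂
      rw [insertBy_front _ _ _ h₂]
      rw [List.takeWhile_cons, List.dropWhile_cons]
      have : ¬ m < key x := not_lt_of_gt hgt
      simp only [decide_eq_true_eq, if_neg this, List.flatMap_cons, List.flatMap_nil]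
      simp

theorem dedup_append_singleton {α : Type} [BEq α] [LawfulBEq α] (l : List α) (k : α) :
    PySem.List.dedup (l ++ [k])
      = if k ∈ l then PySem.List.dedup l else PySem.List.dedup l ++ [k] := by
  show PySem.Set.ofList (l ++ [k]) = _
  rw [PySem.Set.ofList_append]
  rw [show (PySem.Set.ofList l).update [k] = (PySem.Set.ofList l).add k from by simp [PySem.Set.update]]
  by_cases hk : k ∈ l
  · rw [PySem.Set.add_of_mem (by rw [PySem.Set.mem_ofList]; exact hk), if_pos hk]
    simp
  · rw [if_neg hk]
    rw [PySem.Set.add_of_not_mem (by rw [PySem.Set.mem_ofList]; exact hk)]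
    simp

theorem dropWhile_lt_ge (k : String) :
    ∀ l : List String, l.Pairwise (· < ·) →
    ∀ b ∈ l.dropWhile (fun a => decide (a < k)), ¬ b < k := by
  intro l
  induction l with
  | nil => simp
  | cons a t ih =>
    intro hp b hb
    rw [List.dropWhile_cons] at hb
    by_cases ha : a < k
    · simp only [decide_eq_true_eq, if_pos ha] at hb
      exact ih (List.pairwise_cons.mp hp).2 b hb
    · simp only [decide_eq_true_eq, if_neg ha] at hb
      rcases List.mem_cons.mp hb with h | h
      · exact h ▸ ha
      · have : a < b := (List.pairwise_cons.mp hp).1 b h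
        intro hbk
        exact ha (lt_trans this hbk)

theorem sorted_dedup_append_not_mem (l : List String) (k : String) (hk : k ∉ l) :
    PySem.List.sorted (PySem.List.dedup (l ++ [k])) (fun x => x) false
      = (PySem.List.sorted (PySem.List.dedup l) (fun x => x) false).takeWhile (fun a => decide (a < k))
        ++ k :: (PySem.List.sorted (PySem.List.dedup l) (fun x => x) false).dropWhile (fun a => decide (a < k)) := by
  set ms := PySem.List.sorted (PySem.List.dedup l) (fun x => x) false with hms
  have hpair : ms.Pairwise (· < ·) := by
    rw [hms, PySem.List.dedup_eq_ofList]
    exact PySem.List.sorted_ofList_pairwise_lt l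
  have hknot : k ∉ ms := by
    rw [hms]
    intro h
    exact hk ((PySem.List.mem_dedup l k).mp ((PySem.List.mem_sorted _ _ _ _).mp h))
  have htw := List.takeWhile_append_dropWhile (p := fun a => decide (a < k)) (l := ms)
  apply PySem.List.sorted_eq_of_perm_of_pairwise_lt
  · have h1 := List.perm_middle (a := k) (l₁ := ms.takeWhile (fun a => decide (a < k)))
      (l₂ := ms.dropWhile (fun a => decide (a < k)))
    rw [htw] at h1
    have h2 : (k :: ms).Perm (k :: PySem.List.dedup l) :=
      List.Perm.cons k (PySem.List.sorted_perm _ _ _)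
    have h3 : (k :: PySem.List.dedup l).Perm (PySem.List.dedup l ++ [k]) :=
      List.perm_append_comm (l₁ := [k]) (l₂ := PySem.List.dedup l)
    have h4 := (h1.trans h2).trans h3
    rwa [show PySem.List.dedup (l ++ [k]) = PySem.List.dedup l ++ [k] from by
      rw [dedup_append_singleton, if_neg hk]]
  · rw [List.pairwise_append]
    refine ⟨List.Pairwise.sublist (List.takeWhile_sublist _) hpair, ?_, ?_⟩
    · rw [List.pairwise_cons]
      refine ⟨?_, List.Pairwise.sublist (List.dropWhile_sublist _) hpair⟩
      intro b hb
      have h1 := dropWhile_lt_ge k ms hpair b hb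
      have h2 : b ≠ k := fun h => hknot (h ▸ (List.dropWhile_sublist _).mem hb)
      exact lt_of_le_of_ne (not_lt.mp h1) (Ne.symm h2)
    · intro a ha b hb
      have ha' : a < k := by
        have := List.mem_takeWhile_imp ha
        simpa using this
      rcases List.mem_cons.mp hb with h | h
      · exact h ▸ ha'
      · have := dropWhile_lt_ge k ms hpair b h
        exact lt_of_lt_of_le ha' (not_lt.mp this)

theorem pvMs_pairwise (xs : List (List (String × String))) : (pvMs xs).Pairwise (· < ·) := by
  rw [pvMs, PySem.List.dedup_eq_ofList]
  exact PySem.List.sorted_ofList_pairwise_lt _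

theorem pvGrp_key (xs : List (List (String × String))) :
    ∀ m, ∀ y ∈ pvGrp xs m, pvModelOf y = m := by
  intro m y hy
  rw [pvGrp] at hy
  exact eq_of_beq (List.mem_filter.mp hy).2

theorem pvMs_mem (xs : List (List (String × String))) (m : String) :
    m ∈ pvMs xs ↔ m ∈ xs.map pvModelOf := by
  rw [pvMs, PySem.List.mem_sorted, PySem.List.mem_dedup]

theorem pvGrp_append (xs : List (List (String × String))) (x : List (String × String)) (m : String) :
    pvGrp (xs ++ [x]) m = pvGrp xs m ++ (if pvModelOf x == m then [x] else []) := by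
  rw [pvGrp, pvGrp, List.filter_append]
  congr 1
  simp [List.filter_cons]

theorem pvGrp_empty_of_not_mem (xs : List (List (String × String))) (m : String)
    (h : m ∉ xs.map pvModelOf) : pvGrp xs m = [] := by
  rw [pvGrp, List.filter_eq_nil_iff]
  intro y hy hbeq
  exact h (List.mem_map.mpr ⟨y, hy, eq_of_beq hbeq⟩)

theorem sorted_eq_flatMap_groups (xs : List (List (String × String))) :
    PySem.List.sorted xs pvModelOf false = (pvMs xs).flatMap (pvGrp xs) := by
  induction xs using List.reverseRecOn with
  | nil => simp [pvMs, PySem.List.sorted, PySem.List.dedup, PySem.Set.ofList]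
  | append_singleton xs x ih =>
    have hstep : PySem.List.sorted (xs ++ [x]) pvModelOf false
        = PySem.List.insertBy (fun a b => decide (pvModelOf a < pvModelOf b)) x
            (PySem.List.sorted xs pvModelOf false) := by
      rw [PySem.List.sorted_eq_foldl_insertBy, PySem.List.sorted_eq_foldl_insertBy,
        List.foldl_append, List.foldl_cons, List.foldl_nil]
    rw [hstep, ih]
    by_cases hk : pvModelOf x ∈ pvMs xs
    · rw [insertBy_grouped_mem pvModelOf x _ _ (pvMs_pairwise xs) hk (fun m _ => pvGrp_key xs m)]
      have hms : pvMs (xs ++ [x]) = pvMs xs := by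
        rw [pvMs, List.map_append, List.map_cons, List.map_nil, dedup_append_singleton,
          if_pos ((pvMs_mem xs _).mp hk)]
        rfl
      rw [hms]
      apply flatMap_congr_mem
      intro m hm
      by_cases hmk : m = pvModelOf x
      · rw [if_pos hmk, pvGrp_append, hmk, beq_self_eq_true, if_pos rfl]
      · rw [if_neg hmk, pvGrp_append, if_neg (by simp [Ne.symm hmk]), List.append_nil]
    · rw [insertBy_grouped_not_mem pvModelOf x _ _ (pvMs_pairwise xs) hk (fun m _ => pvGrp_key xs m)]
      have hknot : pvModelOf x ∉ xs.map pvModelOf := fun h => hk ((pvMs_mem xs _).mpr h)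
      have hms : pvMs (xs ++ [x])
          = (pvMs xs).takeWhile (fun a => decide (a < pvModelOf x))
            ++ pvModelOf x :: (pvMs xs).dropWhile (fun a => decide (a < pvModelOf x)) := by
        rw [pvMs, List.map_append, List.map_cons, List.map_nil,
          sorted_dedup_append_not_mem _ _ hknot]
        rfl
      rw [hms, List.flatMap_append, List.flatMap_cons]
      have htw : ((pvMs xs).takeWhile (fun a => decide (a < pvModelOf x))).flatMap (pvGrp (xs ++ [x]))
          = ((pvMs xs).takeWhile (fun a => decide (a < pvModelOf x))).flatMap (pvGrp xs) := by
        apply flatMap_congr_mem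
        intro m hm
        have hmlt : m < pvModelOf x := by simpa using List.mem_takeWhile_imp hm
        rw [pvGrp_append, if_neg (by simp [ne_of_gt hmlt]), List.append_nil]
      have hdw : ((pvMs xs).dropWhile (fun a => decide (a < pvModelOf x))).flatMap (pvGrp (xs ++ [x]))
          = ((pvMs xs).dropWhile (fun a => decide (a < pvModelOf x))).flatMap (pvGrp xs) := by
        apply flatMap_congr_mem
        intro m hm
        have hmem : m ∈ pvMs xs := (List.dropWhile_sublist _).mem hm
        have hne : pvModelOf x ≠ m := fun h => hk (h ▸ hmem)
        rw [pvGrp_append, if_neg (by simp [hne]), List.append_nil]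
      have hgx : pvGrp (xs ++ [x]) (pvModelOf x) = [x] := by
        rw [pvGrp_append, if_pos (beq_self_eq_true _), pvGrp_empty_of_not_mem xs _ hknot,
          List.nil_append]
      rw [htw, hdw, hgx]
      simp [List.append_assoc]

-- ---- the groupby loop over a grouped list ----
theorem takeWhile_all_append {α : Type} (p : α → Bool) (l₁ l₂ : List α)
    (h : ∀ a ∈ l₁, p a = true) : (l₁ ++ l₂).takeWhile p = l₁ ++ l₂.takeWhile p := by
  induction l₁ with
  | nil => simp
  | cons a t ih =>
    rw [List.cons_append, List.takeWhile_cons, if_pos (h a (by simp)), List.cons_append,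
      ih (fun a ha => h a (by simp [ha]))]

theorem dropWhile_all_append {α : Type} (p : α → Bool) (l₁ l₂ : List α)
    (h : ∀ a ∈ l₁, p a = true) : (l₁ ++ l₂).dropWhile p = l₂.dropWhile p := by
  induction l₁ with
  | nil => simp
  | cons a t ih =>
    rw [List.cons_append, List.dropWhile_cons, if_pos (h a (by simp))]
    exact ih (fun a ha => h a (by simp [ha]))

theorem takeWhile_none {α : Type} (p : α → Bool) (l : List α)
    (h : ∀ a ∈ l, p a = false) : l.takeWhile p = [] := by
  cases l with
  | nil => rfl
  | cons a t => rw [List.takeWhile_cons, if_neg (by simp [h a (by simp)])]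

theorem dropWhile_none {α : Type} (p : α → Bool) (l : List α)
    (h : ∀ a ∈ l, p a = false) : l.dropWhile p = l := by
  cases l with
  | nil => rfl
  | cons a t => rw [List.dropWhile_cons, if_neg (by simp [h a (by simp)])]

theorem pvGroupsB_flatMap :
    ∀ (ms : List String) (g : String → List (List (String × String))), ms.Pairwise (· < ·) →
    (∀ m ∈ ms, ∀ y ∈ g m, pvModelOf y = m) → (∀ m ∈ ms, g m ≠ []) →
    pvGroupsB (ms.flatMap g)
      = (ms.length, String.join (ms.map (fun m => "\n\n【" ++ m ++ "】" ++ pvBody (g m)))) := by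
  intro ms
  induction ms with
  | nil => intro g _ _ _; simp [pvGroupsB, String.join]
  | cons m t ih =>
    intro g hp hg hne
    have hmt : ∀ m' ∈ t, m < m' := (List.pairwise_cons.mp hp).1
    obtain ⟨r, gs, hgm⟩ : ∃ r gs, g m = r :: gs := by
      cases h : g m with
      | nil => exact absurd h (hne m (by simp))
      | cons r gs => exact ⟨r, gs, rfl⟩
    have hr : pvModelOf r = m := hg m (by simp) r (by rw [hgm]; simp)
    have hgs : ∀ y ∈ gs, (pvModelOf y == pvModelOf r) = true := by
      intro y hy
      rw [hr, beq_iff_eq]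
      exact hg m (by simp) y (by rw [hgm]; simp [hy])
    have hrest : ∀ y ∈ t.flatMap g, (pvModelOf y == pvModelOf r) = false := by
      intro y hy
      obtain ⟨m', hm', hy'⟩ := List.mem_flatMap.mp hy
      rw [hg m' (by simp [hm']) y hy', hr, beq_eq_false_iff_ne]
      exact ne_of_gt (hmt m' hm')
    rw [List.flatMap_cons, hgm]
    refine (pvGroupsB.eq_2 r (gs ++ List.flatMap g t)).trans ?_
    rw [takeWhile_all_append _ _ _ hgs, takeWhile_none _ _ hrest, List.append_nil,
      dropWhile_all_append _ _ _ hgs, dropWhile_none _ _ hrest,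
      ih g (List.pairwise_cons.mp hp).2 (fun m' hm' => hg m' (by simp [hm']))
        (fun m' hm' => hne m' (by simp [hm']))]
    rw [List.map_cons, join_cons, List.length_cons, hr, hgm]
    simp [pvBody, String.append_assoc]

-- ---- A-side reshaping (dict → sorted groups → flat line list) ----
theorem pvLoop {α γ : Type} (hdr : α → String) (items : α → List γ) (fmt : γ → String) :
  ∀ (l : List α) (acc : List String),
    l.foldl (fun lines p => (items p).foldl (fun lines r => lines ++ [fmt r]) (lines ++ [hdr p])) acc
    = acc ++ l.flatMap (fun p => hdr p :: (items p).map fmt) := by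
  intro l
  induction l with
  | nil => simp
  | cons x xs ih =>
    intro acc
    rw [List.foldl_cons, PySem.List.foldl_append_singleton_eq_map, ih]
    simp [List.flatMap_cons]

theorem pvDictItems (results : List (List (String × List (String × String)))) :
    (results.foldl
      (fun (d : PySem.Dict String (List (List (String × String)))) result =>
        d.modify (pvModelOf (pvRecOf result)) [] (· ++ [pvRecOf result]))
      PySem.Dict.empty).items
    = (PySem.List.dedup (results.map (fun r => pvModelOf (pvRecOf r)))).map
        (fun m => (m, (results.filter (fun r => pvModelOf (pvRecOf r) == m)).map pvRecOf)) := by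
  set d := results.foldl
      (fun (d : PySem.Dict String (List (List (String × String)))) result =>
        d.modify (pvModelOf (pvRecOf result)) [] (· ++ [pvRecOf result]))
      PySem.Dict.empty with hd
  have hkeys : d.keys = PySem.List.dedup (results.map (fun r => pvModelOf (pvRecOf r))) := by
    rw [hd, PySem.Dict.keys_foldl_modify_key, PySem.Dict.keys_empty, PySem.Set.update_nil_left,
      PySem.List.dedup_eq_ofList]
  have hnodup : d.keys.Nodup := by
    rw [hd]; exact PySem.Dict.nodup_keys_foldl_modify_key _ _ _ _ _ (by simp)
  have hgetD : ∀ m, d.getD m [] = (results.filter (fun r => pvModelOf (pvRecOf r) == m)).map pvRecOf := by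
    intro m
    have hfold : d = (results.map (fun r => (pvModelOf (pvRecOf r), pvRecOf r))).foldl
        (fun d p => d.modify p.1 [] (· ++ [p.2])) PySem.Dict.empty := by
      rw [hd, List.foldl_map]
    rw [hfold, PySem.Dict.getD_foldl_modify_append, PySem.Dict.getD_empty, List.nil_append,
      List.filter_map, List.map_map]
    rfl
  rw [PySem.Dict.items_eq_map_keys d hnodup [], hkeys]
  exact List.map_congr_left (fun m _ => by rw [hgetD m])

theorem pvSortedItems (results : List (List (String × List (String × String)))) :
    PySem.List.sorted
      ((PySem.List.dedup (results.map (fun r => pvModelOf (pvRecOf r)))).map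
        (fun m => (m, (results.filter (fun r => pvModelOf (pvRecOf r) == m)).map pvRecOf)))
      (fun p => p.1) false
    = (PySem.List.sorted (PySem.List.dedup (results.map (fun r => pvModelOf (pvRecOf r)))) (fun x => x) false).map
        (fun m => (m, (results.filter (fun r => pvModelOf (pvRecOf r) == m)).map pvRecOf)) := by
  apply PySem.List.sorted_eq_of_perm_of_pairwise_lt
  · exact List.Perm.map _ (PySem.List.sorted_perm _ _ _)
  · have h := PySem.List.sorted_ofList_pairwise_lt (results.map (fun r => pvModelOf (pvRecOf r)))
    rw [← PySem.List.dedup_eq_ofList] at h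
    exact List.Pairwise.map _ (fun a b hab => hab) h

theorem pvMerge (m : String) : "\n" ++ ("\n【" ++ m ++ "】") = "\n\n【" ++ m ++ "】" := by
  rw [← String.toList_inj]
  simp [String.toList_append]

theorem main_eq (results : List (List (String × List (String × String)))) (query : String) :
    format_comparison_result results query = format_comparison_result_alt results query := by
  by_cases hnil : results = []
  · simp [format_comparison_result, format_comparison_result_alt, hnil]
  · have hxsmap : (results.map pvRecOf).map pvModelOf
        = results.map (fun r => pvModelOf (pvRecOf r)) := by
      rw [List.map_map]; rfl
    have hgrp : ∀ m, pvGrp (results.map pvRecOf) m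
        = (results.filter (fun r => pvModelOf (pvRecOf r) == m)).map pvRecOf := by
      intro m
      rw [pvGrp, List.filter_map]
      rfl
    -- A reduced to header :: flat list of lines over the sorted groups
    have hA : format_comparison_result results query
        = PySem.Str.join "\n"
            (("\n找到 " ++ PySem.Int.toStr ((pvMs (results.map pvRecOf)).length : Int) ++ " 个相关型号:")
              :: (pvMs (results.map pvRecOf)).flatMap
                  (fun m => ("\n【" ++ m ++ "】")
                    :: ((PySem.List.slice (pvGrp (results.map pvRecOf) m) none (some 8)).map pvLine))) := by
      unfold format_comparison_result
      simp only [if_neg hnil]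
      have hsize : (results.foldl
          (fun (d : PySem.Dict String (List (List (String × String)))) result =>
            d.modify (pvModelOf (pvRecOf result)) [] (· ++ [pvRecOf result]))
          PySem.Dict.empty).size
          = (pvMs (results.map pvRecOf)).length := by
        show (results.foldl
          (fun (d : PySem.Dict String (List (List (String × String)))) result =>
            d.modify (pvModelOf (pvRecOf result)) [] (· ++ [pvRecOf result]))
          PySem.Dict.empty).items.length = _
        rw [pvDictItems, pvMs, hxsmap, PySem.List.length_sorted]
        simp
      rw [pvDictItems results, pvSortedItems results, pvLoop, List.singleton_append,
        List.flatMap_map, hsize]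
      congr 1
      rw [pvMs, hxsmap]
      congr 1
      apply flatMap_congr_mem
      intro m _
      rw [hgrp m]
    -- B reduced to header ++ concatenation of the per-model blocks
    have hB : format_comparison_result_alt results query
        = "\n找到 " ++ PySem.Int.toStr ((pvMs (results.map pvRecOf)).length : Int) ++ " 个相关型号:"
            ++ String.join ((pvMs (results.map pvRecOf)).map
                (fun m => "\n\n【" ++ m ++ "】" ++ pvBody (pvGrp (results.map pvRecOf) m))) := by
      unfold format_comparison_result_alt
      simp only [if_neg hnil]
      have hsorted := sorted_eq_flatMap_groups (results.map pvRecOf)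
      have hGB := pvGroupsB_flatMap (pvMs (results.map pvRecOf)) (pvGrp (results.map pvRecOf))
        (pvMs_pairwise _) (fun m _ => pvGrp_key _ m)
        (fun m hm => by
          obtain ⟨y, hy, hym⟩ := List.mem_map.mp ((pvMs_mem _ m).mp hm)
          intro hempty
          have hymem : y ∈ pvGrp (results.map pvRecOf) m := by
            rw [pvGrp]; exact List.mem_filter.mpr ⟨hy, by simp [hym]⟩
          rw [hempty] at hymem
          exact List.not_mem_nil hymem)
      rw [hsorted, hGB]
    rw [hA, hB, str_join_newline]
    congr 1
    rw [List.map_flatMap, join_flatMap]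
    apply congrArg
    apply List.map_congr_left
    intro m _
    rw [List.map_cons, join_cons, List.map_map, pvMerge]
    rw [pvBody]
    rfl

-- ===== VERDICT (by name: the statement is the Claim_ definition above) =====
theorem format_comparison_result_spec : Claim_equal_format_comparison_result := by
  intro results query _ _
  exact main_eq results query
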